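-- pv_equiv track=rewrite | github.com/lakshitsachdeva/WideQuant | scripts/verify_data_pipeline.py | _lexical_rank_fallback
-- ===== SOURCE A (Python) =====
-- def _lexical_rank_fallback(query_tokens: list[str], doc_tokens: list[list[str]]) -> list[int]:
--     """Rank by lexical overlap if BM25 is unavailable."""
--     query_set = set(query_tokens)
--     scored: list[tuple[int, int]] = []
--     for idx, tokens in enumerate(doc_tokens):
--         overlap = len(query_set.intersection(tokens))
--         scored.append((overlap, idx))
--     scored.sort(key=lambda item: item[0], reverse=True)
--     return [idx for _, idx in scored]
-- ===== SOURCE B (Python) =====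
-- def _lexical_rank_fallback(query_tokens: list[str], doc_tokens: list[list[str]]) -> list[int]:
--     """Rank by lexical overlap using a counting/bucket sort on the bounded overlap value."""
--     query_set = set(query_tokens)
--     buckets = [[] for _ in range(len(query_set) + 1)]
--     for idx, tokens in enumerate(doc_tokens):
--         overlap = len(query_set.intersection(tokens))
--         buckets[overlap].append(idx)
--     result = []
--     for bucket in reversed(buckets):
--         result.extend(bucket)
--     return result
-- ===== Notes on version B (the rewrite author's own statement) =====
-- stated objective: alternative
-- what changed: Replaces the comparison sort on (overlap, idx) tuples by a counting/bucket sort: document indices are appended to buckets[overlap] (overlap is bounded by len(query_set)) and the buckets are emitted from highest overlap down, which reproduces the stable descending order.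
import Mathlib
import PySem

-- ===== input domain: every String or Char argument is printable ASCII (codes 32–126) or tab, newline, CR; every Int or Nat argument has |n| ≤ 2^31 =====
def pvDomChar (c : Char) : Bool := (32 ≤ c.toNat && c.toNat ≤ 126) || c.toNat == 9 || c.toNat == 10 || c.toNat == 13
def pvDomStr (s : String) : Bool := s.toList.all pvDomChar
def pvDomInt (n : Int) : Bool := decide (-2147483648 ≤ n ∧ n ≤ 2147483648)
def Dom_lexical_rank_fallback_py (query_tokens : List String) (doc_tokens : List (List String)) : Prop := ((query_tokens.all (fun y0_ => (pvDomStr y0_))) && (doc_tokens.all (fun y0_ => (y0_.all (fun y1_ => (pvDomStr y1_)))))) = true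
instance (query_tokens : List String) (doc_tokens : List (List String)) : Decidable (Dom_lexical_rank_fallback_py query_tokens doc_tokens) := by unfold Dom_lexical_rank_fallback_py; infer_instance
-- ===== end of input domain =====

-- ===== PORT A =====
-- B replaces the tuple sort by a bucket (counting) sort keyed on the bounded overlap value; same return value.
def lexical_rank_fallback_py (query_tokens : List String) (doc_tokens : List (List String)) : List Int :=
  let query_set := PySem.Set.ofList query_tokens
  let scored : List (Int × Int) := (PySem.List.enumerate doc_tokens).foldl
    (fun acc p => acc ++ [(((PySem.Set.inter query_set p.2).length : Int), p.1)]) []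
  let sortedScored := PySem.List.sorted scored (fun item => item.1) true
  sortedScored.map (fun p => p.2)

-- ===== PORT B =====
def lexical_rank_fallback_py_alt (query_tokens : List String) (doc_tokens : List (List String)) : List Int :=
  let query_set := PySem.Set.ofList query_tokens
  let buckets0 : List (List Int) := List.replicate (query_set.length + 1) []
  let buckets := (PySem.List.enumerate doc_tokens).foldl
    (fun bs p =>
      let overlap := (PySem.Set.inter query_set p.2).length
      bs.set overlap (bs.getD overlap [] ++ [p.1])) buckets0
  buckets.reverse.foldl (fun acc b => acc ++ b) []

-- ===== PRECONDITION & SPEC =====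
def Spec_lexical_rank_fallback_py (query_tokens : List String) (doc_tokens : List (List String)) (out : List Int) : Prop := out = lexical_rank_fallback_py_alt query_tokens doc_tokens
instance (query_tokens : List String) (doc_tokens : List (List String)) (out : List Int) : Decidable (Spec_lexical_rank_fallback_py query_tokens doc_tokens out) := by unfold Spec_lexical_rank_fallback_py; infer_instance

-- ===== CLAIM (what is proved, stated in full; the proofs are below) =====
def Claim_equal_lexical_rank_fallback_py : Prop := ∀ (query_tokens : List String) (doc_tokens : List (List String)), Dom_lexical_rank_fallback_py query_tokens doc_tokens → Spec_lexical_rank_fallback_py query_tokens doc_tokens (lexical_rank_fallback_py query_tokens doc_tokens)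

-- ===== LEMMAS AND PROOFS =====

-- buckets read from the highest index down to 0, concatenated
def fdesc {alpha : Type} : Nat → (Nat → List alpha) → List alpha
  | 0, f => f 0
  | (k+1), f => f (k+1) ++ fdesc k f

theorem fdesc_congr {alpha : Type} (L : Nat) (f g : Nat → List alpha)
    (h : ∀ k, k ≤ L → f k = g k) : fdesc L f = fdesc L g := by
  induction L with
  | zero => exact h 0 (le_refl 0)
  | succ n ih => simp [fdesc, h (n+1) (le_refl _), ih (fun k hk => h k (Nat.le_succ_of_le hk))]

theorem fdesc_nil {alpha : Type} (L : Nat) : fdesc L (fun _ => ([] : List alpha)) = [] := by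
  induction L with
  | zero => rfl
  | succ n ih => simp [fdesc, ih]

theorem fdesc_map {alpha beta : Type} (L : Nat) (f : Nat → List alpha) (g : alpha → beta) :
    (fdesc L f).map g = fdesc L (fun k => (f k).map g) := by
  induction L with
  | zero => rfl
  | succ n ih => simp [fdesc, ih]

theorem mem_fdesc {alpha : Type} (L : Nat) (f : Nat → List alpha) (x : alpha)
    (h : x ∈ fdesc L f) : ∃ k, k ≤ L ∧ x ∈ f k := by
  induction L with
  | zero => exact ⟨0, le_refl 0, h⟩
  | succ n ih =>
    simp only [fdesc, List.mem_append] at h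
    rcases h with h | h
    · exact ⟨n+1, le_refl _, h⟩
    · rcases ih h with ⟨k, hk, hm⟩
      exact ⟨k, Nat.le_succ_of_le hk, hm⟩

theorem insertBy_cons {alpha : Type} (before : alpha → alpha → Bool) (x y : alpha) (ys : List alpha) :
    PySem.List.insertBy before x (y :: ys)
      = if before x y then x :: y :: ys else y :: PySem.List.insertBy before x ys := rfl

theorem insertBy_skip {alpha : Type} (before : alpha → alpha → Bool) (x : alpha)
    (as bs : List alpha) (h : ∀ a ∈ as, before x a = false) :
    PySem.List.insertBy before x (as ++ bs) = as ++ PySem.List.insertBy before x bs := by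
  induction as with
  | nil => rfl
  | cons a t ih =>
    rw [List.cons_append, insertBy_cons, h a List.mem_cons_self,
        ih (fun y hy => h y (List.mem_cons_of_mem a hy))]
    simp

theorem insertBy_front {alpha : Type} (before : alpha → alpha → Bool) (x : alpha)
    (bs : List alpha) (h : ∀ b ∈ bs, before x b = true) :
    PySem.List.insertBy before x bs = x :: bs := by
  cases bs with
  | nil => rfl
  | cons b t => simp [PySem.List.insertBy, h b List.mem_cons_self]

-- inserting an element of key m into a descending bucket concatenation appends it to bucket m
theorem insert_fdesc (L m : Nat) (x : Int × Int) (f : Nat → List (Int × Int))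
    (hf : ∀ k, k ≤ L → ∀ p ∈ f k, p.1 = (k : Int)) (hx : x.1 = (m : Int)) (hm : m ≤ L) :
    PySem.List.insertBy (fun a b => decide (b.1 < a.1)) x (fdesc L f)
      = fdesc L (fun k => if k = m then f k ++ [x] else f k) := by
  induction L with
  | zero =>
    have hm0 : m = 0 := Nat.le_zero.mp hm
    subst hm0
    show PySem.List.insertBy _ x (f 0) = _
    rw [PySem.List.insertBy_of_forall_not_before]
    · simp [fdesc]
    · intro y hy
      have := hf 0 (le_refl 0) y hy
      simp [this, hx]
  | succ n ih =>
    show PySem.List.insertBy _ x (f (n+1) ++ fdesc n f) = _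
    rw [insertBy_skip]
    · by_cases hcase : m = n + 1
      · subst hcase
        rw [insertBy_front _ _ _ (fun b hb => by
          rcases mem_fdesc n f b hb with ⟨k, hk, hbk⟩
          have := hf k (Nat.le_succ_of_le hk) b hbk
          simp only [this, hx, decide_eq_true_eq]
          exact_mod_cast Nat.lt_succ_of_le hk)]
        show _ = fdesc (n+1) _
        simp only [fdesc, reduceIte]
        rw [fdesc_congr n (fun k => if k = n + 1 then f k ++ [x] else f k) f
              (fun k hk => if_neg (by omega))]
        simp
      · have hmn : m ≤ n := Nat.lt_succ_iff.mp (Nat.lt_of_le_of_ne hm hcase)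
        rw [ih (fun k hk p hp => hf k (Nat.le_succ_of_le hk) p hp) hmn]
        simp only [fdesc]
        rw [if_neg (fun h => hcase h.symm)]
    · intro a ha
      have := hf (n+1) (le_refl _) a ha
      simp only [this, hx, decide_eq_false_iff_not, not_lt]
      exact_mod_cast hm

-- A's stable reverse sort of a list whose keys are the Nat-valued overlaps, as bucket concatenation
theorem sorted_rev_eq_fdesc (L : Nat) (xs : List (Int × Int))
    (h : ∀ p ∈ xs, ∃ k, k ≤ L ∧ p.1 = (k : Int)) :
    PySem.List.sorted xs (fun it => it.1) true
      = fdesc L (fun k => xs.filter (fun p => p.1 == (k : Int))) := by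
  induction xs using List.reverseRecOn with
  | nil =>
    simp [PySem.List.sorted, List.filter_nil, fdesc_nil]
  | append_singleton ys x ih =>
    rcases h x (by simp) with ⟨m, hm, hxm⟩
    rw [PySem.List.sorted_rev_eq_foldl_insertBy, List.foldl_append,
        ← PySem.List.sorted_rev_eq_foldl_insertBy, List.foldl_cons, List.foldl_nil,
        ih (fun p hp => h p (List.mem_append_left _ hp))]
    rw [insert_fdesc L m x _ ?_ hxm hm]
    · apply fdesc_congr
      intro k hk
      rw [List.filter_append]
      by_cases hkm : k = m
      · subst hkm; simp [hxm]
      · simp only [List.filter_cons, List.filter_nil, hxm]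
        have : ((m : Int) == (k : Int)) = false := by
          simp only [beq_eq_false_iff_ne, ne_eq, Int.natCast_inj]
          exact fun h' => hkm h'.symm
        simp [this, hkm]
    · intro k hk p hp
      rw [List.mem_filter] at hp
      exact eq_of_beq hp.2

-- B's bucket array after the loop, as filters over the enumerated input
theorem buckets_eq (L : Nat) (ov : (Int × List String) → Nat) (hov : ∀ p, ov p ≤ L)
    (e : List (Int × List String)) :
    e.foldl (fun bs p => bs.set (ov p) (bs.getD (ov p) [] ++ [p.1])) (List.replicate (L+1) [])
      = (List.range (L+1)).map (fun k => (e.filter (fun p => ov p == k)).map (fun p => p.1)) := by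
  induction e using List.reverseRecOn with
  | nil =>
    apply List.ext_getElem
    · simp
    · intro i h1 h2; simp
  | append_singleton ys x ih =>
    rw [List.foldl_append, List.foldl_cons, List.foldl_nil, ih]
    have hx : ov x < L + 1 := Nat.lt_succ_of_le (hov x)
    rw [PySem.List.getD_map_range _ _ _ _ hx]
    apply List.ext_getElem
    · simp
    · intro i h1 h2
      simp only [List.length_set, List.length_map, List.length_range] at h1
      rw [List.getElem_set]
      simp only [List.getElem_map, List.getElem_range]
      rw [List.filter_append]
      by_cases hi : ov x = i
      · simp [hi]
      · have : (ov x == i) = false := by simp [hi]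
        simp [hi, this]

theorem flatten_rev_map_range {alpha : Type} (n : Nat) (g : Nat → List alpha) :
    ((List.range (n+1)).map g).reverse.flatten = fdesc n g := by
  induction n with
  | zero => simp [fdesc, List.range_succ]
  | succ k ih =>
    rw [show List.range (k+1+1) = List.range (k+1) ++ [k+1] from List.range_succ,
        List.map_append, List.reverse_append, List.flatten_append]
    simp only [List.map_cons, List.map_nil, List.reverse_cons, List.reverse_nil,
      List.nil_append, List.flatten_cons, List.flatten_nil, List.append_nil, fdesc]
    rw [ih]

theorem overlap_le (q : List String) (t : List String) :
    (PySem.Set.inter (PySem.Set.ofList q) t).length ≤ (PySem.Set.ofList q).length :=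
  List.length_filter_le _ _

-- ===== VERDICT (by name: the statement is the Claim_ definition above) =====
theorem lexical_rank_fallback_py_spec : Claim_equal_lexical_rank_fallback_py := by
  intro query_tokens doc_tokens _
  unfold Spec_lexical_rank_fallback_py lexical_rank_fallback_py lexical_rank_fallback_py_alt
  simp only []
  set q := PySem.Set.ofList query_tokens with hq
  set L := q.length with hL
  set e := PySem.List.enumerate doc_tokens with he
  set ov : (Int × List String) → Nat := fun p => (PySem.Set.inter q p.2).length with hov
  have hovle : ∀ p, ov p ≤ L := fun p => overlap_le query_tokens p.2
  -- A side
  rw [PySem.List.foldl_append_singleton_eq_map, List.nil_append]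
  rw [sorted_rev_eq_fdesc L _ ?hkeys]
  case hkeys =>
    intro p hp
    rw [List.mem_map] at hp
    rcases hp with ⟨a, ha, rfl⟩
    exact ⟨ov a, hovle a, rfl⟩
  rw [fdesc_map]
  -- B side
  rw [buckets_eq L ov hovle e, PySem.List.foldl_append_eq_flatten, List.nil_append,
      flatten_rev_map_range]
  apply fdesc_congr
  intro k hk
  rw [List.filter_map]
  rw [List.map_map]
  apply congrArg (List.map _)
  apply List.filter_congr
  intro p hp
  simp only [Function.comp]
  by_cases h : ov p = k
  · have h1 : (((ov p : Nat) : Int) == (k : Int)) = true := by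
      simp only [beq_iff_eq, Int.natCast_inj]; exact h
    have h2 : (ov p == k) = true := by simp only [beq_iff_eq]; exact h
    rw [h1, h2]
  · have h1 : (((ov p : Nat) : Int) == (k : Int)) = false := by
      simp only [beq_eq_false_iff_ne, ne_eq, Int.natCast_inj]; exact h
    have h2 : (ov p == k) = false := by simp only [beq_eq_false_iff_ne, ne_eq]; exact h
    rw [h1, h2]
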